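-- pv_equiv track=rewrite | github.com/pypi-data/pypi-mirror-278 | packages/commonhelper/commonhelper-0.0.3-py3-none-any.whl/commonhelper/__init__.py | distribute_items_evenly
-- ===== SOURCE A (Python) =====
-- def distribute_items_evenly(size, ngroup):
-- 	'''
-- 		Distribute items evenly and yield the beginindex (inclusive) and endindex (exclusive) of each group
--
-- 		Example usage:
--
-- 		.. code-block:: python
--
-- 			distribute_items_evenly(5, 2)
-- 			# [(0, 3), (3, 5)]
--
-- 			distribute_items_evenly(6, 2)
-- 			# [(0, 3), (3, 6)]
--
--
--
-- 			# In conjunction with MultiProcessRun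
--
-- 			## Your custom function
-- 			def _square(arr1):
-- 				return [element * element for element in arr1]
--
-- 			## Initialization
-- 			CPU_NO = 40
-- 			arr1 = [i for i in range(0, 10000)]
--
-- 			## Body
-- 			with MultiProcessRun(CPU_NO, _square) as mr:
-- 				for (start, end) in distribute_items_evenly(len(arr1), CPU_NO):
-- 					mr.run(args=[arr1[start:end]])
-- 				results = mr.get(wait=True)
-- 			## Final results
-- 			final_results = list(itertools.chain.from_iterable(results))
--
-- 	'''
-- 	if size < ngroup:
-- 		raise Exception
-- 	group_size = size // ngroup
-- 	extra = size - ngroup * group_size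
-- 	prev_index = 0
-- 	for i in range(ngroup):
-- 		index = prev_index + group_size + (1 if extra > i else 0)
-- 		yield (prev_index, index)
-- 		prev_index = index
-- 	assert index == size
-- ===== SOURCE B (Python) =====
-- def distribute_items_evenly(size, ngroup):
--     if size < ngroup:
--         raise Exception
--     group_size = size // ngroup
--     extra = size - ngroup * group_size
--     for i in range(ngroup):
--         yield (i * group_size + min(i, extra),
--                (i + 1) * group_size + min(i + 1, extra))
-- ===== Notes on version B (the rewrite author's own statement) =====
-- stated objective: simpler
-- what changed: Replaces A's loop that threads a prev_index accumulator with a per-group closed form: group i's range is computed independently as (i*group_size + min(i, extra), (i+1)*group_size + min(i+1, extra)).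
import Mathlib
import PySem

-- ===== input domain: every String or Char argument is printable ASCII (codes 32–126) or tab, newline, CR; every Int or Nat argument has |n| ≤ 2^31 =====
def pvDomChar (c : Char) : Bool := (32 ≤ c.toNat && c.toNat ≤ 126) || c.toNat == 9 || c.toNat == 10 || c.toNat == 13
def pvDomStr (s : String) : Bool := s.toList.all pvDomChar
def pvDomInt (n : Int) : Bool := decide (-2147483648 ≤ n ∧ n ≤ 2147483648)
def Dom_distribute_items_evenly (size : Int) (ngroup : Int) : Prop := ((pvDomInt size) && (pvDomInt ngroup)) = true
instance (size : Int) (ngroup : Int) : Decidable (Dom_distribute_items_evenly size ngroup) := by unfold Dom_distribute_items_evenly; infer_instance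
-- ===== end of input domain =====

-- B replaces A's threaded prev_index accumulator with a per-index closed form
-- (start/end computed directly from i via min(i, extra)); objective: simpler.


-- ===== PORT A =====
-- literal port of A: group_size = size // ngroup, extra = size - ngroup*group_size,
-- then a fold threading prev_index and appending each yielded pair.
def distribute_items_evenly (size : Int) (ngroup : Int) : List (Int × Int) :=
  let group_size := PySem.Int.floordiv size ngroup
  let extra := size - ngroup * group_size
  let st := (PySem.List.pyRange 0 ngroup 1).foldl
    (fun (acc : List (Int × Int) × Int) i =>
      let index := acc.2 + group_size + (if extra > i then 1 else 0)
      (acc.1 ++ [(acc.2, index)], index))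
    ([], 0)
  st.1

-- ===== PORT B =====
-- literal port of B: each pair computed independently from i by a closed form.
def distribute_items_evenly_alt (size : Int) (ngroup : Int) : List (Int × Int) :=
  let group_size := PySem.Int.floordiv size ngroup
  let extra := size - ngroup * group_size
  (PySem.List.pyRange 0 ngroup 1).map (fun i =>
    (i * group_size + min i extra, (i + 1) * group_size + min (i + 1) extra))

-- ===== PRECONDITION & SPEC =====
-- Pre_ excludes exactly the inputs where Python A raises: size < ngroup (Exception),
-- ngroup = 0 (ZeroDivisionError), ngroup < 0 (UnboundLocalError at the assert).
def Pre_distribute_items_evenly (size : Int) (ngroup : Int) : Prop :=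
  1 ≤ ngroup ∧ ngroup ≤ size
instance (size : Int) (ngroup : Int) : Decidable (Pre_distribute_items_evenly size ngroup) := by
  unfold Pre_distribute_items_evenly; infer_instance

def pvWitness_distribute_items_evenly : Int × Int := (5, 2)

def Spec_distribute_items_evenly (size : Int) (ngroup : Int) (out : List (Int × Int)) : Prop :=
  out = distribute_items_evenly_alt size ngroup
instance (size : Int) (ngroup : Int) (out : List (Int × Int)) : Decidable (Spec_distribute_items_evenly size ngroup out) := by
  unfold Spec_distribute_items_evenly; infer_instance

-- ===== CLAIM (what is proved, stated in full; the proofs are below) =====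
def Claim_equal_distribute_items_evenly : Prop := ∀ (size : Int) (ngroup : Int), Dom_distribute_items_evenly size ngroup → Pre_distribute_items_evenly size ngroup → Spec_distribute_items_evenly size ngroup (distribute_items_evenly size ngroup)

-- ===== LEMMAS AND PROOFS =====

-- invariant of A's fold over range(n) (for nonnegative e, which extra always is
-- under Pre_): the accumulated list is B's map over the same range, and
-- prev_index equals the closed form n*g + min n e.
lemma fold_closed_form (g e : Int) (he : 0 ≤ e) (n : Nat) :
    (PySem.List.pyRange 0 n 1).foldl
      (fun (acc : List (Int × Int) × Int) i =>
        let index := acc.2 + g + (if e > i then 1 else 0)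
        (acc.1 ++ [(acc.2, index)], index))
      ([], 0)
    = ((PySem.List.pyRange 0 n 1).map (fun i =>
         (i * g + min i e, (i + 1) * g + min (i + 1) e)),
       n * g + min (n : Int) e) := by
  induction n with
  | zero =>
      have h0 : min (0 : Int) e = 0 := by omega
      simp [PySem.List.pyRange_one_eq_nil, h0]
  | succ n ih =>
      have hcast : ((n + 1 : Nat) : Int) = (n : Int) + 1 := by push_cast; ring
      rw [hcast, PySem.List.pyRange_one_succ_right (Int.natCast_nonneg n),
          List.foldl_append, List.map_append, ih]
      have key : min (n : Int) e + (if e > (n : Int) then 1 else 0) = min ((n : Int) + 1) e := by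
        split_ifs with h <;> omega
      simp only [List.foldl_cons, List.foldl_nil, List.map_cons, List.map_nil]
      have hidx : (n : Int) * g + min (n : Int) e + g + (if e > (n : Int) then 1 else 0)
                = ((n : Int) + 1) * g + min ((n : Int) + 1) e := by
        rw [← key]; ring
      simp [hidx]

-- first component of the fold, for an arbitrary Int bound
lemma fold_fst (g e : Int) (he : 0 ≤ e) (m : Int) :
    ((PySem.List.pyRange 0 m 1).foldl
      (fun (acc : List (Int × Int) × Int) i =>
        let index := acc.2 + g + (if e > i then 1 else 0)
        (acc.1 ++ [(acc.2, index)], index))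
      ([], 0)).1
    = (PySem.List.pyRange 0 m 1).map (fun i =>
        (i * g + min i e, (i + 1) * g + min (i + 1) e)) := by
  by_cases h : m ≤ 0
  · simp [PySem.List.pyRange_one_eq_nil h]
  · have hm : m = ((m.toNat : Nat) : Int) := by omega
    -- (m > 0 here)
    rw [hm, fold_closed_form g e he m.toNat]

lemma ports_agree (size ngroup : Int) (h : 0 < ngroup) :
    distribute_items_evenly size ngroup = distribute_items_evenly_alt size ngroup := by
  unfold distribute_items_evenly distribute_items_evenly_alt
  have he : 0 ≤ size - ngroup * PySem.Int.floordiv size ngroup := by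
    rw [PySem.Int.floordiv_eq_ediv_of_pos h]
    have h1 := Int.mul_ediv_add_emod size ngroup
    have h2 := Int.emod_nonneg size (by omega : ngroup ≠ 0)
    omega
  exact fold_fst (PySem.Int.floordiv size ngroup)
    (size - ngroup * PySem.Int.floordiv size ngroup) he ngroup

-- ===== VERDICT (by name: the statement is the Claim_ definition above) =====
theorem distribute_items_evenly_spec : Claim_equal_distribute_items_evenly := by
  intro size ngroup _ hpre
  exact ports_agree size ngroup (lt_of_lt_of_le Int.zero_lt_one hpre.1)
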